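-- pv_equiv track=rewrite | github.com/jfgoodall/advent-of-code | 2025/py/day06.py | part2
-- ===== SOURCE A (Python) =====
-- import math
--
-- OPERATION_MAP = {
--     '+': sum,
--     '*': math.prod
-- }
--
-- def part2(data):
--     ops = data[-1].split()
--     data = data[:-1]
--
--     total = 0
--     start_idx = 0
--     end_idx = 0
--     for op in ops:
--         while (
--             end_idx < len(data[0]) and
--             any(data[row][end_idx] != ' ' for row in range(len(data)))
--         ):
--             end_idx += 1
--
--         nums = [0] * (end_idx - start_idx)
--         for i in range(start_idx, end_idx):
--             for row in range(len(data)):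
--                 if data[row][i] != ' ':
--                     nums[i-start_idx] *= 10
--                     nums[i-start_idx] += int(data[row][i])
--
--         end_idx += 1
--         start_idx = end_idx
--
--         total += OPERATION_MAP[op](nums)
--
--     return total
-- ===== SOURCE B (Python) =====
-- import math
--
-- OPERATION_MAP = {
--     '+': sum,
--     '*': math.prod
-- }
--
-- def part2(data):
--     ops = data[-1].split()
--     if not ops:
--         return 0
--     rows = data[:-1]
--     width = len(rows[0]) if rows else 0
--
--     # split the column indices into groups separated by blank columns,
--     # building the group list back-to-front
--     groups = [[]]
--     for i in reversed(range(width)):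
--         if all(row[i] == ' ' for row in rows):
--             groups.insert(0, [])
--         else:
--             groups[0].insert(0, i)
--
--     total = 0
--     for op in ops:
--         cols = groups.pop(0) if groups else []
--         nums = []
--         for i in cols:
--             num = 0
--             for row in rows:
--                 if row[i] != ' ':
--                     num = num * 10 + int(row[i])
--             nums.append(num)
--         total += OPERATION_MAP[op](nums)
--     return total
-- ===== Notes on version B (the rewrite author's own statement) =====
-- stated objective: alternative
-- what changed: B replaces A's stateful start/end index chasing (a while loop advancing end_idx per op) by first splitting all column indices into blank-separated groups, built back-to-front, and then pairing each op with the next group popped from that list (empty when groups run out).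
-- outside the precondition, e.g. on part2(['5 x', '+']): A returns 5, B returns 5; on part2(['1 234', '2 5', '+']): A returns 12, B returns 12
import Mathlib
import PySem

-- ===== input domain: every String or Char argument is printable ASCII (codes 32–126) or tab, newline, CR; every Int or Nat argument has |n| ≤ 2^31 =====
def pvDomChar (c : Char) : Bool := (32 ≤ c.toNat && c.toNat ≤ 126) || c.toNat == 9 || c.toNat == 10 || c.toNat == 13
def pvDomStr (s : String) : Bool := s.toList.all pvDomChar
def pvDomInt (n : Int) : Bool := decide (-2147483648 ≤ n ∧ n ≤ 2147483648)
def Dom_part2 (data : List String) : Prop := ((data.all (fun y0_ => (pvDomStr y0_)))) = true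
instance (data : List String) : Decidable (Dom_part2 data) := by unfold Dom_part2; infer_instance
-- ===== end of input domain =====

-- B groups the blank-separated column indices up front (built back-to-front) and pairs ops
-- with the groups popped in order, instead of A's stateful start/end index chasing; same cost,
-- different decomposition (objective: alternative).  Return-value equivalence only.

-- ===== PORT A =====
-- shared char access: data[row][i]; out-of-range (Python IndexError) defaults to ' ' — excluded by Pre_
def pvCharAt (r : String) (i : Nat) : Char := (PySem.Str.pyGet? r (i : Int)).getD ' '

-- shared digit accumulation (A's inner rows loop / B's per-column number); int(c) as c-'0', exact on digits (Pre_)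
def pvColNum (rows : List String) (i : Nat) : Int :=
  rows.foldl (fun num r =>
    if pvCharAt r i ≠ ' ' then num * 10 + (((pvCharAt r i).toNat : Int) - 48) else num) 0

-- OPERATION_MAP[op](nums); unknown op (Python KeyError) defaults to 0 — excluded by Pre_
def pvApplyOp (op : String) (nums : List Int) : Int :=
  if op = "+" then nums.sum else if op = "*" then nums.prod else 0

-- A's while loop: advance end_idx while in range and the column has a non-space
def pvAdvance (rows : List String) (width j : Nat) : Nat :=
  if h : j < width then
    if rows.any (fun r => pvCharAt r j != ' ') then pvAdvance rows width (j + 1) else j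
  else j
termination_by width - j

-- A's per-op loop body over state (total, start_idx, end_idx)
def pvStepA (rows : List String) (width : Nat) (acc : Int × Nat × Nat) (op : String) :
    Int × Nat × Nat :=
  let e := pvAdvance rows width acc.2.2
  let nums := (List.range' acc.2.1 (e - acc.2.1)).map (pvColNum rows)
  (acc.1 + pvApplyOp op nums, e + 1, e + 1)

def part2 (data : List String) : Int :=
  match PySem.List.pyGet? data (-1) with
  | none => 0  -- data[-1] raises IndexError on []; excluded by Pre_
  | some last =>
    let ops := PySem.Str.split₀ last
    let rows := PySem.List.slice data none (some (-1))
    let width := (rows.headD "").toList.length  -- len(data[0]); rows = [] raises only when ops ≠ [], excluded by Pre_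
    (ops.foldl (pvStepA rows width) (0, 0, 0)).1

-- ===== PORT B =====
-- split the column indices into blank-separated groups, building the list back-to-front
def pvSplitCols (rows : List String) (cols : List Nat) : List (List Nat) :=
  cols.foldr (fun i gs =>
      if rows.all (fun r => pvCharAt r i == ' ') then [] :: gs
      else match gs with
           | g :: t => (i :: g) :: t
           | [] => [[i]]) [[]]

-- B's per-op loop body: pop the next group (empty when exhausted) and apply the op
def pvStepB (rows : List String) (acc : Int × List (List Nat)) (op : String) :
    Int × List (List Nat) :=
  match acc.2 with
  | [] => (acc.1 + pvApplyOp op [], [])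
  | g :: t => (acc.1 + pvApplyOp op (g.map (pvColNum rows)), t)

def part2_alt (data : List String) : Int :=
  match data.getLast? with
  | none => 0
  | some last =>
    let ops := PySem.Str.split₀ last
    if ops.isEmpty then 0
    else
      let rows := data.dropLast
      let width := (rows.headD "").toList.length
      let gs := pvSplitCols rows (List.range width)
      (ops.foldl (pvStepB rows) (0, gs)).1

-- ===== PRECONDITION & SPEC =====
-- Pre_ excludes inputs where Python A raises: empty data (IndexError), and — when there is at
-- least one op — empty grid (IndexError), an op other than '+'/'*' (KeyError), a row shorter than
-- the first row (IndexError while probing a column), or a non-space non-digit character in the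
-- first len(data[0]) columns (ValueError in int()).  The last two conditions are slightly wider
-- than A's raising set: A returns normally when the offending column lies beyond the region the
-- ops make it scan (see claim cites); Pre_ stays closed-form and excludes those inputs too.
def Pre_part2 (data : List String) : Prop :=
  data ≠ [] ∧
  (PySem.Str.split₀ ((data.getLast?).getD "") = [] ∨
    (data.dropLast ≠ [] ∧
     (∀ r ∈ data.dropLast, (data.dropLast.headD "").toList.length ≤ r.toList.length) ∧
     (∀ r ∈ data.dropLast, ∀ i ∈ List.range (data.dropLast.headD "").toList.length,
        r.toList.getD i ' ' = ' ' ∨ ('0' ≤ r.toList.getD i ' ' ∧ r.toList.getD i ' ' ≤ '9')) ∧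
     (∀ op ∈ PySem.Str.split₀ ((data.getLast?).getD ""), op = "+" ∨ op = "*")))
instance (data : List String) : Decidable (Pre_part2 data) := by unfold Pre_part2; infer_instance

def pvWitness_part2 : List String := ["12 34", "+ *"]

def Spec_part2 (data : List String) (out : Int) : Prop := out = part2_alt data
instance (data : List String) (out : Int) : Decidable (Spec_part2 data out) := by unfold Spec_part2; infer_instance

-- ===== CLAIM (what is proved, stated in full; the proofs are below) =====
def Claim_equal_part2 : Prop := ∀ (data : List String), Dom_part2 data → Pre_part2 data → Spec_part2 data (part2 data)

-- ===== LEMMAS AND PROOFS =====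

theorem pvAdvance_ge (rows : List String) (width j : Nat) : j ≤ pvAdvance rows width j := by
  fun_induction pvAdvance rows width j with
  | case1 j h hb ih => omega
  | case2 j h hb => omega
  | case3 j h => omega

theorem pvAdvance_le (rows : List String) (width j : Nat) (hj : j ≤ width) :
    pvAdvance rows width j ≤ width := by
  fun_induction pvAdvance rows width j with
  | case1 j h hb ih => exact ih (by omega)
  | case2 j h hb => omega
  | case3 j h => omega

theorem pvAdvance_stop (rows : List String) (width j : Nat) (hj : width ≤ j) :
    pvAdvance rows width j = j := by
  unfold pvAdvance
  simp [Nat.not_lt.mpr hj]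

-- characterisation of B's group splitting in terms of A's advance
theorem pvSplitCols_range (rows : List String) (width : Nat) :
    ∀ n j, j + n = width →
    pvSplitCols rows (List.range' j n) =
      List.range' j (pvAdvance rows width j - j) ::
        (if pvAdvance rows width j < width
         then pvSplitCols rows
            (List.range' (pvAdvance rows width j + 1) (width - (pvAdvance rows width j + 1)))
         else []) := by
  intro n
  induction n with
  | zero =>
    intro j hj
    have hs : pvAdvance rows width j = j := pvAdvance_stop rows width j (by omega)
    simp [pvSplitCols, hs, show ¬ (j < width) by omega]
  | succ n ih =>
    intro j hj
    have hjw : j < width := by omega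
    rw [List.range'_succ]
    by_cases hb : rows.all (fun r => pvCharAt r j == ' ')
    · -- blank column: new empty group, advance stops at j
      have hbp : ∀ r ∈ rows, pvCharAt r j = ' ' := by simpa using hb
      have hany : rows.any (fun r => pvCharAt r j != ' ') = false := by
        simpa using hb
      have hadv : pvAdvance rows width j = j := by
        unfold pvAdvance; simp [hjw, hany]
      have : pvSplitCols rows (j :: List.range' (j + 1) n) =
          [] :: pvSplitCols rows (List.range' (j + 1) n) := by
        simp only [pvSplitCols, List.foldr_cons]
        rw [if_pos hb]
      rw [this, hadv]
      simp [hjw, show width - (j + 1) = n by omega]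
    · -- non-blank column: j joins the head group, advance continues
      have hbp : ¬ ∀ r ∈ rows, pvCharAt r j = ' ' := by simpa using hb
      have hany : rows.any (fun r => pvCharAt r j != ' ') = true := by
        rcases List.all_eq_false.mp (Bool.eq_false_iff.mpr hb) with ⟨r, hr, hrf⟩
        exact List.any_eq_true.mpr ⟨r, hr, by simpa using hrf⟩
      have hadv : pvAdvance rows width j = pvAdvance rows width (j + 1) := by
        conv_lhs => unfold pvAdvance
        simp [hjw, hany]
      have hge : j + 1 ≤ pvAdvance rows width (j + 1) := pvAdvance_ge rows width (j + 1)
      have hrest := ih (j + 1) (by omega)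
      have : pvSplitCols rows (j :: List.range' (j + 1) n) =
          match pvSplitCols rows (List.range' (j + 1) n) with
          | g :: t => (j :: g) :: t
          | [] => [[j]] := by
        simp [pvSplitCols, hbp]
      rw [this, hrest, hadv]
      have hr1 : j :: List.range' (j + 1) (pvAdvance rows width (j + 1) - (j + 1)) =
          List.range' j (pvAdvance rows width (j + 1) - j) := by
        rw [show pvAdvance rows width (j + 1) - j
              = (pvAdvance rows width (j + 1) - (j + 1)) + 1 by omega,
           List.range'_succ]
      simp [hr1]

-- after the columns are exhausted: every remaining op contributes an empty group on both sides
theorem pvTailLoop (rows : List String) (width : Nat) :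
    ∀ (ops : List String) (t : Int) (j : Nat), width < j →
    (ops.foldl (pvStepA rows width) (t, j, j)).1 =
      (ops.foldl (pvStepB rows) (t, ([] : List (List Nat)))).1 := by
  intro ops
  induction ops with
  | nil => intro t j hj; rfl
  | cons op ops ih =>
    intro t j hj
    have hs : pvAdvance rows width j = j := pvAdvance_stop rows width j (by omega)
    simp only [List.foldl_cons, pvStepA, pvStepB, hs, Nat.sub_self, List.range']
    simpa using ih (t + pvApplyOp op []) (j + 1) (by omega)

-- main loop invariant: A's index state j corresponds to B's remaining groups of columns j..width-1
theorem pvMainLoop (rows : List String) (width : Nat) :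
    ∀ (ops : List String) (t : Int) (j : Nat), j ≤ width →
    (ops.foldl (pvStepA rows width) (t, j, j)).1 =
      (ops.foldl (pvStepB rows) (t, pvSplitCols rows (List.range' j (width - j)))).1 := by
  intro ops
  induction ops with
  | nil => intro t j hj; rfl
  | cons op ops ih =>
    intro t j hj
    have hge := pvAdvance_ge rows width j
    have hle := pvAdvance_le rows width j hj
    rw [pvSplitCols_range rows width (width - j) j (by omega)]
    simp only [List.foldl_cons, pvStepA, pvStepB]
    by_cases hlt : pvAdvance rows width j < width
    · rw [if_pos hlt]
      simpa using ih (t + pvApplyOp op ((List.range' j (pvAdvance rows width j - j)).map (pvColNum rows)))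
        (pvAdvance rows width j + 1) (by omega)
    · rw [if_neg hlt]
      simpa using pvTailLoop rows width ops
        (t + pvApplyOp op ((List.range' j (pvAdvance rows width j - j)).map (pvColNum rows)))
        (pvAdvance rows width j + 1) (by omega)

-- the two ports agree on every input (Pre_ is only needed for faithfulness to the Pythons)
theorem pvPorts_eq (data : List String) : part2 data = part2_alt data := by
  unfold part2 part2_alt
  rw [PySem.List.pyGet?_neg_one, PySem.List.slice_to_neg_one]
  cases h : data.getLast? with
  | none => rfl
  | some last =>
    simp only []
    by_cases hop : (PySem.Str.split₀ last).isEmpty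
    · rw [List.isEmpty_iff.mp hop]
      simp
    · rw [if_neg hop]
      have := pvMainLoop (data.dropLast) ((data.dropLast.headD "").toList.length)
        (PySem.Str.split₀ last) 0 0 (by omega)
      rw [this]
      simp [List.range_eq_range']

-- ===== VERDICT (by name: the statement is the Claim_ definition above) =====
theorem part2_spec : Claim_equal_part2 := by
  intro data _ _
  unfold Spec_part2
  exact pvPorts_eq data
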